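-- pv_equiv track=rewrite | github.com/MinsangKong/DailyProblem | 08-26/2.py | pulling
-- ===== SOURCE A (Python) =====
-- def pulling(board):
--     temp = []
--     while True:
--         size = len(board)
--         if size == 1 :
--             return board[0][0]
--
--         for i in range(0,size,2):
--             data = []
--             for j in range(0,size,2):
--                 case = sorted([board[i][j],board[i+1][j],board[i][j+1],board[i+1][j+1]])
--                 data.append(case[2])
--             temp.append(data)
--         board = temp
--         temp = []
-- ===== SOURCE B (Python) =====
-- def pulling(board):
--     n = len(board)
--     if n == 1:
--         return board[0][0]
--     h = n // 2
--     tl = [row[:h] for row in board[:h]]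
--     tr = [row[h:n] for row in board[:h]]
--     bl = [row[:h] for row in board[h:n]]
--     br = [row[h:n] for row in board[h:n]]
--     return sorted([pulling(tl), pulling(tr), pulling(bl), pulling(br)])[2]
-- ===== Notes on version B (the rewrite author's own statement) =====
-- stated objective: alternative
-- what changed: Replaced the breadth-first level-by-level sweep (rebuilding the whole board at each halving) with a depth-first divide-and-conquer recursion that splits the board into four quadrants, recurses to a scalar on each, and returns the 2nd-largest of the four.
import Mathlib
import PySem

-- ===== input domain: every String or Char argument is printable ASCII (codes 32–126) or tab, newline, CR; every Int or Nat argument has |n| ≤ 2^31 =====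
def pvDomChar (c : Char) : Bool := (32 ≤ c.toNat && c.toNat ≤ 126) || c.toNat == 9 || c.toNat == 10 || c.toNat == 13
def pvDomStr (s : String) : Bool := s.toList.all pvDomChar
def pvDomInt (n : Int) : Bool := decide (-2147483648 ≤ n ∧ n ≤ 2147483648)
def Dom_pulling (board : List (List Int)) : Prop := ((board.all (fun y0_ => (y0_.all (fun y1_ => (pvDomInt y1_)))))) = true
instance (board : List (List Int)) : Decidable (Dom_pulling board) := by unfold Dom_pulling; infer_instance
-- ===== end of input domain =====

-- B replaces A's level-by-level sweep with a quadrant divide-and-conquer recursion (alternative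
-- decomposition, not claimed faster); equivalence is about the return value on power-of-two
-- square boards (on other boards Python A raises IndexError or loops, see Pre_pulling).

-- ===== PORT A =====
-- board[i][j] (indices are always in range under Pre_; default used only off-domain)
def pullA_cell (b : List (List Int)) (i j : Int) : Int :=
  PySem.List.pyGetD (PySem.List.pyGetD b i ([] : List Int)) j 0

-- case = sorted([board[i][j], board[i+1][j], board[i][j+1], board[i+1][j+1]]); case[2]
def pullA_block (b : List (List Int)) (i j : Int) : Int :=
  PySem.List.pyGetD
    (PySem.List.sorted
      [pullA_cell b i j, pullA_cell b (i+1) j, pullA_cell b i (j+1), pullA_cell b (i+1) (j+1)]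
      (fun x => x) false) 2 0

-- one pass of the while-loop body: the two nested 'for … in range(0, size, 2)' loops
def pullA_step (b : List (List Int)) : List (List Int) :=
  (PySem.List.pyRange 0 (b.length : Int) 2).map (fun i =>
    (PySem.List.pyRange 0 (b.length : Int) 2).map (fun j => pullA_block b i j))

-- the 'while True' loop; fuel only makes the recursion total (Python loops forever on [],
-- outside Pre_); under Pre_ the size halves each pass so board.length + 1 passes suffice
def pullingFuel : Nat → List (List Int) → Int
  | 0, _ => 0
  | f+1, b => if b.length = 1 then pullA_cell b 0 0 else pullingFuel f (pullA_step b)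

def pulling (board : List (List Int)) : Int :=
  pullingFuel (board.length + 1) board

-- ===== PORT B =====
-- the four quadrant slices of Source B: board[:h], board[h:n], row[:h], row[h:n]
-- (take/drop is exact for these slices: 0 ≤ h ≤ n = len(board))
def qTL (b : List (List Int)) : List (List Int) :=
  (b.take (b.length / 2)).map (fun r => r.take (b.length / 2))
def qTR (b : List (List Int)) : List (List Int) :=
  (b.take (b.length / 2)).map (fun r => (r.drop (b.length / 2)).take (b.length - b.length / 2))
def qBL (b : List (List Int)) : List (List Int) :=
  ((b.drop (b.length / 2)).take (b.length - b.length / 2)).map (fun r => r.take (b.length / 2))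
def qBR (b : List (List Int)) : List (List Int) :=
  ((b.drop (b.length / 2)).take (b.length - b.length / 2)).map
    (fun r => (r.drop (b.length / 2)).take (b.length - b.length / 2))

-- 'board.length ≤ 1' (instead of '= 1') only makes the recursion total: on [] Python B
-- recurses forever (outside Pre_)
def pulling_alt (board : List (List Int)) : Int :=
  if board.length ≤ 1 then
    PySem.List.pyGetD (PySem.List.pyGetD board 0 ([] : List Int)) 0 0
  else
    PySem.List.pyGetD
      (PySem.List.sorted
        [pulling_alt (qTL board), pulling_alt (qTR board),
         pulling_alt (qBL board), pulling_alt (qBR board)]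
        (fun x => x) false) 2 0
termination_by board.length
decreasing_by
  · simp [qTL]; omega
  · simp [qTR]; omega
  · simp [qBL]; omega
  · simp [qBR]; omega

-- ===== PRECONDITION & SPEC =====
-- exactly the boards on which Python A returns: a power-of-two number of rows, every row at
-- least that long (otherwise A raises IndexError, or loops forever on the empty board)
def Pre_pulling (board : List (List Int)) : Prop :=
  (∃ k < board.length + 1, board.length = 2 ^ k) ∧ ∀ r ∈ board, board.length ≤ r.length
instance (board : List (List Int)) : Decidable (Pre_pulling board) := by
  unfold Pre_pulling; infer_instance

def pvWitness_pulling : List (List Int) := [[1, 2], [3, 4]]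

def Spec_pulling (board : List (List Int)) (out : Int) : Prop := out = pulling_alt board
instance (board : List (List Int)) (out : Int) : Decidable (Spec_pulling board out) := by
  unfold Spec_pulling; infer_instance

-- ===== CLAIM (what is proved, stated in full; the proofs are below) =====
def Claim_equal_pulling : Prop :=
  ∀ (board : List (List Int)), Dom_pulling board → Pre_pulling board →
    Spec_pulling board (pulling board)


-- ===== LEMMAS AND PROOFS =====

-- value of cell (i, j) of a board, with Nat indices (matches pullA_cell on casts)
def cellN (b : List (List Int)) (i j : Nat) : Int := (b.getD i ([] : List Int)).getD j 0

-- the 2nd-largest of the 2x2 block whose top-left corner is (2*i, 2*j)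
def blkN (b : List (List Int)) (i j : Nat) : Int :=
  PySem.List.pyGetD
    (PySem.List.sorted
      [cellN b (2*i) (2*j), cellN b (2*i+1) (2*j), cellN b (2*i) (2*j+1), cellN b (2*i+1) (2*j+1)]
      (fun x => x) false) 2 0

-- an m x m board given by a cell function
def grid (m : Nat) (f : Nat → Nat → Int) : List (List Int) :=
  (List.range m).map (fun i => (List.range m).map (fun j => f i j))

theorem length_grid (m : Nat) (f : Nat → Nat → Int) : (grid m f).length = m := by
  simp [grid]

theorem grid_congr (m : Nat) (f g : Nat → Nat → Int)
    (h : ∀ i < m, ∀ j < m, f i j = g i j) : grid m f = grid m g := by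
  unfold grid
  refine List.map_congr_left (fun i hi => ?_)
  refine List.map_congr_left (fun j hj => ?_)
  exact h i (List.mem_range.mp hi) j (List.mem_range.mp hj)

theorem cell_bridge (b : List (List Int)) (i j : Nat) :
    pullA_cell b (i : Int) (j : Int) = cellN b i j := by
  simp [pullA_cell, cellN, PySem.List.pyGetD_natCast]

theorem blk_bridge (b : List (List Int)) (i j : Nat) :
    pullA_block b ((2*i : Nat) : Int) ((2*j : Nat) : Int) = blkN b i j := by
  unfold pullA_block blkN
  rw [show ((2*i : Nat) : Int) + 1 = ((2*i+1 : Nat) : Int) by push_cast; ring,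
      show ((2*j : Nat) : Int) + 1 = ((2*j+1 : Nat) : Int) by push_cast; ring,
      cell_bridge, cell_bridge, cell_bridge, cell_bridge]

theorem pyRange_two (m : Nat) :
    PySem.List.pyRange 0 ((2*m : Nat) : Int) 2 = (List.range m).map (fun k => ((2*k : Nat) : Int)) := by
  rw [PySem.List.pyRange_of_pos 0 ((2*m : Nat) : Int) (s := 2) (by norm_num)]
  rcases Nat.eq_zero_or_pos m with hm | hm
  · subst hm; simp
  · rw [if_pos (by push_cast; omega)]
    have : ((((2*m : Nat) : Int) - 0 + 2 - 1) / 2).toNat = m := by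
      push_cast
      omega
    rw [this]
    refine List.map_congr_left (fun k _ => ?_)
    push_cast
    ring

theorem step_eq (b : List (List Int)) (m : Nat) (hn : b.length = 2*m) :
    pullA_step b = grid m (blkN b) := by
  unfold pullA_step grid
  rw [show (b.length : Int) = ((2*m : Nat) : Int) by rw [hn], pyRange_two, List.map_map]
  refine List.map_congr_left (fun i _ => ?_)
  simp only [Function.comp_apply]
  rw [List.map_map]
  refine List.map_congr_left (fun j _ => ?_)
  simp only [Function.comp_apply]
  exact blk_bridge b i j

-- cell locality: cells of a quadrant are cells of the whole board
theorem cell_qTL (b : List (List Int)) (i j : Nat)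
    (hi : i < b.length / 2) (hj : j < b.length / 2) :
    cellN (qTL b) i j = cellN b i j := by
  unfold cellN qTL
  simp only [List.getD_eq_getElem?_getD, List.getElem?_map, List.getElem?_take, if_pos hi]
  cases hr : b[i]? with
  | none => simp
  | some r => simp [List.getElem?_take, if_pos hj]

theorem cell_qTR (b : List (List Int)) (i j : Nat)
    (hi : i < b.length / 2) (hj : j < b.length - b.length / 2) :
    cellN (qTR b) i j = cellN b i (b.length / 2 + j) := by
  unfold cellN qTR
  simp only [List.getD_eq_getElem?_getD, List.getElem?_map, List.getElem?_take, if_pos hi]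
  cases hr : b[i]? with
  | none => simp
  | some r =>
    simp [List.getElem?_take, List.getElem?_drop, if_pos hj]

theorem cell_qBL (b : List (List Int)) (i j : Nat)
    (hi : i < b.length - b.length / 2) (hj : j < b.length / 2) :
    cellN (qBL b) i j = cellN b (b.length / 2 + i) j := by
  unfold cellN qBL
  simp only [List.getD_eq_getElem?_getD, List.getElem?_map, List.getElem?_take,
    List.getElem?_drop, if_pos hi]
  cases hr : b[b.length / 2 + i]? with
  | none => simp
  | some r => simp [List.getElem?_take, if_pos hj]

theorem cell_qBR (b : List (List Int)) (i j : Nat)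
    (hi : i < b.length - b.length / 2) (hj : j < b.length - b.length / 2) :
    cellN (qBR b) i j = cellN b (b.length / 2 + i) (b.length / 2 + j) := by
  unfold cellN qBR
  simp only [List.getD_eq_getElem?_getD, List.getElem?_map, List.getElem?_take,
    List.getElem?_drop, if_pos hi]
  cases hr : b[b.length / 2 + i]? with
  | none => simp
  | some r =>
    simp [List.getElem?_take, List.getElem?_drop, if_pos hj]

-- quadrants of a grid
theorem mapRange_take {A : Type} (t : Nat) (g : Nat → A) :
    ((List.range (2*t)).map g).take t = (List.range t).map g := by
  rw [← List.map_take, List.take_range, Nat.min_eq_left (by omega)]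

theorem mapRange_drop {A : Type} (t : Nat) (g : Nat → A) :
    ((List.range (2*t)).map g).drop t = (List.range t).map (fun x => g (t + x)) := by
  rw [← List.map_drop]
  have h : List.drop t (List.range (2*t)) = (List.range t).map (fun x => t + x) := by
    have h := @List.drop_left _ (List.range t) ((List.range t).map (fun x => t + x))
    rw [List.length_range] at h
    rw [show 2*t = t + t by ring, List.range_add, h]
  rw [h, List.map_map]
  rfl

theorem mapRange_take_all {A : Type} (t : Nat) (g : Nat → A) :
    ((List.range t).map g).take t = (List.range t).map g :=
  List.take_of_length_le (by simp)

theorem qTL_grid (t : Nat) (f : Nat → Nat → Int) :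
    qTL (grid (2*t) f) = grid t f := by
  unfold qTL
  rw [length_grid, Nat.mul_div_cancel_left t (by norm_num)]
  unfold grid
  rw [mapRange_take, List.map_map]
  exact List.map_congr_left (fun i _ => mapRange_take t (f i))

theorem qTR_grid (t : Nat) (f : Nat → Nat → Int) :
    qTR (grid (2*t) f) = grid t (fun i j => f i (t + j)) := by
  unfold qTR
  rw [length_grid, Nat.mul_div_cancel_left t (by norm_num), show 2*t - t = t by omega]
  unfold grid
  rw [mapRange_take, List.map_map]
  refine List.map_congr_left (fun i _ => ?_)
  simp only [Function.comp_apply]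
  rw [mapRange_drop, mapRange_take_all]

theorem qBL_grid (t : Nat) (f : Nat → Nat → Int) :
    qBL (grid (2*t) f) = grid t (fun i j => f (t + i) j) := by
  unfold qBL
  rw [length_grid, Nat.mul_div_cancel_left t (by norm_num), show 2*t - t = t by omega]
  unfold grid
  rw [mapRange_drop, mapRange_take_all, List.map_map]
  exact List.map_congr_left (fun i _ => mapRange_take t (f (t + i)))

theorem qBR_grid (t : Nat) (f : Nat → Nat → Int) :
    qBR (grid (2*t) f) = grid t (fun i j => f (t + i) (t + j)) := by
  unfold qBR
  rw [length_grid, Nat.mul_div_cancel_left t (by norm_num), show 2*t - t = t by omega]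
  unfold grid
  rw [mapRange_drop, mapRange_take_all, List.map_map]
  refine List.map_congr_left (fun i _ => ?_)
  simp only [Function.comp_apply]
  rw [mapRange_drop, mapRange_take_all]

-- block locality: 2x2 blocks of a quadrant are blocks of the whole board
theorem blk_qTL (b : List (List Int)) (t i j : Nat) (hn : b.length = 4*t)
    (hi : i < t) (hj : j < t) : blkN (qTL b) i j = blkN b i j := by
  unfold blkN
  rw [cell_qTL b _ _ (by omega) (by omega), cell_qTL b _ _ (by omega) (by omega),
      cell_qTL b _ _ (by omega) (by omega), cell_qTL b _ _ (by omega) (by omega)]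

theorem blk_qTR (b : List (List Int)) (t i j : Nat) (hn : b.length = 4*t)
    (hi : i < t) (hj : j < t) : blkN (qTR b) i j = blkN b i (t + j) := by
  have h2 : b.length / 2 = 2*t := by omega
  unfold blkN
  rw [cell_qTR b _ _ (by omega) (by omega), cell_qTR b _ _ (by omega) (by omega),
      cell_qTR b _ _ (by omega) (by omega), cell_qTR b _ _ (by omega) (by omega), h2,
      show 2*t + 2*j = 2*(t+j) by ring, show 2*t + (2*j+1) = 2*(t+j)+1 by ring]

theorem blk_qBL (b : List (List Int)) (t i j : Nat) (hn : b.length = 4*t)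
    (hi : i < t) (hj : j < t) : blkN (qBL b) i j = blkN b (t + i) j := by
  have h2 : b.length / 2 = 2*t := by omega
  unfold blkN
  rw [cell_qBL b _ _ (by omega) (by omega), cell_qBL b _ _ (by omega) (by omega),
      cell_qBL b _ _ (by omega) (by omega), cell_qBL b _ _ (by omega) (by omega), h2,
      show 2*t + 2*i = 2*(t+i) by ring, show 2*t + (2*i+1) = 2*(t+i)+1 by ring]

theorem blk_qBR (b : List (List Int)) (t i j : Nat) (hn : b.length = 4*t)
    (hi : i < t) (hj : j < t) : blkN (qBR b) i j = blkN b (t + i) (t + j) := by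
  have h2 : b.length / 2 = 2*t := by omega
  unfold blkN
  rw [cell_qBR b _ _ (by omega) (by omega), cell_qBR b _ _ (by omega) (by omega),
      cell_qBR b _ _ (by omega) (by omega), cell_qBR b _ _ (by omega) (by omega), h2,
      show 2*t + 2*i = 2*(t+i) by ring, show 2*t + (2*i+1) = 2*(t+i)+1 by ring,
      show 2*t + 2*j = 2*(t+j) by ring, show 2*t + (2*j+1) = 2*(t+j)+1 by ring]

-- reduction commutes with quadrant decomposition (the midlines are never crossed)
theorem len_qTL (b : List (List Int)) : (qTL b).length = b.length / 2 := by
  simp [qTL]; omega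

theorem len_qTR (b : List (List Int)) : (qTR b).length = b.length / 2 := by
  simp [qTR]; omega

theorem len_qBL (b : List (List Int)) : (qBL b).length = b.length - b.length / 2 := by
  simp [qBL]

theorem len_qBR (b : List (List Int)) : (qBR b).length = b.length - b.length / 2 := by
  simp [qBR]

theorem qTL_step (b : List (List Int)) (t : Nat) (hn : b.length = 4*t) :
    qTL (pullA_step b) = pullA_step (qTL b) := by
  rw [step_eq b (2*t) (by omega), qTL_grid,
      step_eq (qTL b) t (by rw [len_qTL]; omega)]
  exact grid_congr _ _ _ (fun i hi j hj => (blk_qTL b t i j hn hi hj).symm)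

theorem qTR_step (b : List (List Int)) (t : Nat) (hn : b.length = 4*t) :
    qTR (pullA_step b) = pullA_step (qTR b) := by
  rw [step_eq b (2*t) (by omega), qTR_grid,
      step_eq (qTR b) t (by rw [len_qTR]; omega)]
  exact grid_congr _ _ _ (fun i hi j hj => (blk_qTR b t i j hn hi hj).symm)

theorem qBL_step (b : List (List Int)) (t : Nat) (hn : b.length = 4*t) :
    qBL (pullA_step b) = pullA_step (qBL b) := by
  rw [step_eq b (2*t) (by omega), qBL_grid,
      step_eq (qBL b) t (by rw [len_qBL]; omega)]
  exact grid_congr _ _ _ (fun i hi j hj => (blk_qBL b t i j hn hi hj).symm)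

theorem qBR_step (b : List (List Int)) (t : Nat) (hn : b.length = 4*t) :
    qBR (pullA_step b) = pullA_step (qBR b) := by
  rw [step_eq b (2*t) (by omega), qBR_grid,
      step_eq (qBR b) t (by rw [len_qBR]; omega)]
  exact grid_congr _ _ _ (fun i hi j hj => (blk_qBR b t i j hn hi hj).symm)

-- row lengths of the quadrants (to propagate the rows-long-enough invariant)
theorem rows_quadrant (b : List (List Int)) (hrows : ∀ r ∈ b, b.length ≤ r.length)
    (q : List (List Int)) (hq : q = qTL b ∨ q = qTR b ∨ q = qBL b ∨ q = qBR b) :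
    ∀ r ∈ q, b.length / 2 ≤ r.length := by
  intro r hr
  rcases hq with rfl | rfl | rfl | rfl <;>
  · first
    | (simp only [qTL, List.mem_map] at hr) | (simp only [qTR, List.mem_map] at hr)
    | (simp only [qBL, List.mem_map] at hr) | (simp only [qBR, List.mem_map] at hr)
    obtain ⟨r', hr', rfl⟩ := hr
    have hmem : r' ∈ b := by
      first
      | exact List.mem_of_mem_take hr'
      | exact List.mem_of_mem_drop (List.mem_of_mem_take hr')
    have := hrows r' hmem
    simp only [List.length_take, List.length_drop]
    omega

-- unfolding equations of pulling_alt
theorem alt_base (b : List (List Int)) (h : b.length ≤ 1) :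
    pulling_alt b = PySem.List.pyGetD (PySem.List.pyGetD b 0 ([] : List Int)) 0 0 := by
  rw [pulling_alt, if_pos h]

theorem alt_rec (b : List (List Int)) (h : 1 < b.length) :
    pulling_alt b =
      PySem.List.pyGetD
        (PySem.List.sorted
          [pulling_alt (qTL b), pulling_alt (qTR b), pulling_alt (qBL b), pulling_alt (qBR b)]
          (fun x => x) false) 2 0 := by
  rw [pulling_alt, if_neg (by omega)]

theorem alt_single (x : Int) : pulling_alt [[x]] = x := by
  rw [alt_base _ (by simp)]
  simp [PySem.List.pyGetD]

theorem rows_grid (m : Nat) (f : Nat → Nat → Int) : ∀ r ∈ grid m f, m ≤ r.length := by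
  intro r hr
  simp only [grid, List.mem_map] at hr
  obtain ⟨i, _, rfl⟩ := hr
  simp

theorem grid_one (f : Nat → Nat → Int) : grid 1 f = [[f 0 0]] := by
  simp [grid, List.range_succ]

theorem alt_step (k : Nat) : ∀ (b : List (List Int)), b.length = 2^(k+1) →
    (∀ r ∈ b, b.length ≤ r.length) → pulling_alt (pullA_step b) = pulling_alt b := by
  induction k with
  | zero =>
    intro b hb hrows
    rcases b with _ | ⟨r0, _ | ⟨r1, _ | ⟨r2, rest⟩⟩⟩ <;> simp at hb
    have h0 : 2 ≤ r0.length := by simpa using hrows r0 (by simp)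
    have h1 : 2 ≤ r1.length := by simpa using hrows r1 (by simp)
    rcases r0 with _ | ⟨a, _ | ⟨a', t0⟩⟩ <;> simp at h0
    rcases r1 with _ | ⟨c, _ | ⟨d, t1⟩⟩ <;> simp at h1
    rw [step_eq _ 1 (by simp), grid_one, alt_single,
        alt_rec _ (by simp)]
    have hq1 : qTL [a :: a' :: t0, c :: d :: t1] = [[a]] := by simp [qTL]
    have hq2 : qTR [a :: a' :: t0, c :: d :: t1] = [[a']] := by simp [qTR]
    have hq3 : qBL [a :: a' :: t0, c :: d :: t1] = [[c]] := by simp [qBL]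
    have hq4 : qBR [a :: a' :: t0, c :: d :: t1] = [[d]] := by simp [qBR]
    rw [hq1, hq2, hq3, hq4, alt_single, alt_single, alt_single, alt_single]
    have hcells : blkN [a :: a' :: t0, c :: d :: t1] 0 0 =
        PySem.List.pyGetD
          (PySem.List.sorted [a, c, a', d] (fun x => x) false) 2 0 := by
      simp [blkN, cellN]
    rw [hcells]
    have hperm : ([a, c, a', d] : List Int).Perm [a, a', c, d] :=
      List.Perm.cons _ (List.Perm.swap _ _ _)
    rw [PySem.List.sorted_eq_sorted_of_perm _ _ _ (fun _ _ h => h) hperm]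
  | succ k ih =>
    intro b hb hrows
    set t := 2^k with ht
    have hn : b.length = 4*t := by rw [hb]; ring
    have hstep : (pullA_step b).length = 2*t := by
      rw [step_eq b (2*t) (by omega), length_grid]
    have h2t : 1 ≤ t := Nat.one_le_two_pow
    rw [alt_rec (pullA_step b) (by omega), alt_rec b (by omega)]
    rw [qTL_step b t hn, qTR_step b t hn, qBL_step b t hn, qBR_step b t hn]
    have hhalf : b.length / 2 = 2*t := by omega
    have lq1 : (qTL b).length = 2^(k+1) := by rw [len_qTL, hhalf]; ring
    have lq2 : (qTR b).length = 2^(k+1) := by rw [len_qTR, hhalf]; ring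
    have lq3 : (qBL b).length = 2^(k+1) := by rw [len_qBL, hhalf]; omega
    have lq4 : (qBR b).length = 2^(k+1) := by rw [len_qBR, hhalf]; omega
    have rq1 := rows_quadrant b hrows (qTL b) (Or.inl rfl)
    have rq2 := rows_quadrant b hrows (qTR b) (Or.inr (Or.inl rfl))
    have rq3 := rows_quadrant b hrows (qBL b) (Or.inr (Or.inr (Or.inl rfl)))
    have rq4 := rows_quadrant b hrows (qBR b) (Or.inr (Or.inr (Or.inr rfl)))
    rw [ih (qTL b) lq1 (fun r hr => by rw [lq1]; have := rq1 r hr; omega),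
        ih (qTR b) lq2 (fun r hr => by rw [lq2]; have := rq2 r hr; omega),
        ih (qBL b) lq3 (fun r hr => by rw [lq3]; have := rq3 r hr; omega),
        ih (qBR b) lq4 (fun r hr => by rw [lq4]; have := rq4 r hr; omega)]

theorem fuel_eq (k : Nat) : ∀ (b : List (List Int)) (f : Nat), b.length = 2^k →
    (∀ r ∈ b, b.length ≤ r.length) → k < f → pullingFuel f b = pulling_alt b := by
  induction k with
  | zero =>
    intro b f hb _ hf
    match f, hf with
    | f + 1, _ =>
      rw [alt_base b (by omega)]
      simp [pullingFuel, hb, pullA_cell]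
  | succ k ih =>
    intro b f hb hrows hf
    match f, hf with
    | f + 1, hf =>
      have h2 : 1 < b.length := by rw [hb]; exact Nat.one_lt_two_pow (by omega)
      show (if b.length = 1 then pullA_cell b 0 0 else pullingFuel f (pullA_step b)) = _
      rw [if_neg (by omega)]
      have hlen : (pullA_step b).length = 2^k := by
        rw [step_eq b (2^k) (by rw [hb]; ring), length_grid]
      have hrows' : ∀ r ∈ pullA_step b, (pullA_step b).length ≤ r.length := by
        intro r hr
        rw [step_eq b (2^k) (by rw [hb]; ring)] at hr ⊢
        rw [length_grid]
        exact rows_grid _ _ r hr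
      rw [ih (pullA_step b) f hlen hrows' (by omega)]
      exact alt_step k b hb hrows

-- ===== VERDICT (by name: the statement is the Claim_ definition above) =====
theorem pulling_spec : Claim_equal_pulling := by
  intro board _ hpre
  obtain ⟨⟨k, _, hk⟩, hrows⟩ := hpre
  unfold Spec_pulling pulling
  exact fuel_eq k board (board.length + 1) hk hrows (by rw [hk]; have := Nat.lt_two_pow_self (n := k); omega)
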